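-- pv_equiv track=rewrite | github.com/vtjeng/coding-contests | kick_start/2021/B/substring/substring.py | process
-- ===== SOURCE A (Python) =====
-- from itertools import tee
--
-- def pairwise(iterable):
--     "s -> (s0,s1), (s1,s2), (s2, s3), ..."
--     a, b = tee(iterable)
--     next(b, None)
--     return zip(a, b)
--
-- def process(case):
--     lengths = [1]
--     for (c1, c2) in pairwise(case):
--         if c2 > c1:
--             cur_length = lengths[-1] + 1
--             lengths.append(cur_length)
--         else:
--             lengths.append(1)
--     return " ".join([str(x) for x in lengths])
-- ===== SOURCE B (Python) =====
-- def process(case):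
--     parts = []
--     n = len(case)
--     i = 0
--     while i < n:
--         j = i + 1
--         while j < n and case[j] > case[j - 1]:
--             j += 1
--         parts.extend(range(1, j - i + 1))
--         i = j
--     return " ".join(map(str, parts))
-- ===== Notes on version B (the rewrite author's own statement) =====
-- stated objective: alternative
-- what changed: Instead of A's per-position recurrence that extends a lengths list by reading its last element, B scans the string as maximal strictly-increasing segments with a two-level index loop and emits range(1, seglen+1) for each segment.
-- intended difference: On the empty string A returns "1" (an artifact of seeding lengths with [1] before the pair loop), while B returns "" because there are no positions; the run-length list of an empty string is naturally empty. — e.g. on process(""): A returns "1", B returns ""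
import Mathlib
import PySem

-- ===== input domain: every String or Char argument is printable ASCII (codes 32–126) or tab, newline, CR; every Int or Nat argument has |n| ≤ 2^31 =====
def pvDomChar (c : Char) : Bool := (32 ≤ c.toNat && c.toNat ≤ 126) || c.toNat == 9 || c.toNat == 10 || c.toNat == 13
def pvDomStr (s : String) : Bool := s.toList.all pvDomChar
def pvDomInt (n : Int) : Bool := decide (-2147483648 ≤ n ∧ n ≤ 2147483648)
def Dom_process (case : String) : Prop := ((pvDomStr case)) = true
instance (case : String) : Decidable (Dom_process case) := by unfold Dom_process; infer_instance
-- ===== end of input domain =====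

-- B scans the string as maximal strictly-increasing segments (two-level index loop emitting 1..seglen per segment) instead of A's last-element recurrence; same cost, different decomposition; on "" B returns "" where A returns its seed "1".

-- ===== PORT A =====
-- pairwise(case) = zip of the characters with their tail; lengths grows by appending;
-- lengths[-1] is PySem.List.pyGet? lens (-1) (lens is never empty, so .getD 0 is exact).
def process (case : String) : String :=
  let l := case.toList
  let lengths := (l.zip l.tail).foldl
    (fun lens (p : Char × Char) =>
      if p.2 > p.1 then
        lens ++ [((PySem.List.pyGet? lens (-1)).getD 0) + 1]
      else
        lens ++ [(1 : Int)]) [(1 : Int)]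
  PySem.Str.join " " (lengths.map PySem.Int.toStr)

-- ===== PORT B =====
-- inner while loop: j advances while j < n and case[j] > case[j-1]
-- (indices are always in range when called, so .getD ' ' is exact there;
--  the Nat fuel only makes the loop structurally total: it is n - j at entry,
--  enough for every iteration the Python loop performs)
def innerJ (l : List Char) (n : Int) : Nat → Int → Int
  | 0, j => j
  | fuel + 1, j =>
    if j < n ∧ ((PySem.List.pyGet? l j).getD ' ' > (PySem.List.pyGet? l (j-1)).getD ' ') then
      innerJ l n fuel (j + 1)
    else j

-- outer while loop: parts.extend(range(1, j - i + 1)); i = j  (fuel = n - i at entry)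
def outer (l : List Char) (n : Int) : Nat → List Int → Int → List Int
  | 0, parts, _ => parts
  | fuel + 1, parts, i =>
    if i < n then
      outer l n fuel
        (parts ++ PySem.List.pyRange 1 (innerJ l n (n - (i + 1)).toNat (i + 1) - i + 1) 1)
        (innerJ l n (n - (i + 1)).toNat (i + 1))
    else parts

def process_alt (case : String) : String :=
  let l := case.toList
  let n : Int := l.length
  PySem.Str.join " " ((outer l n n.toNat [] 0).map PySem.Int.toStr)

-- ===== PRECONDITION & SPEC =====
-- On the empty string A returns "1" (artifact of seeding lengths with [1]); B returns "" since there are no positions, the intended run-length list being empty.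
def D_process (case : String) : Prop := case = ""
instance (case : String) : Decidable (D_process case) := by unfold D_process; infer_instance

def Spec_process (case : String) (out : String) : Prop := ¬ D_process case → out = process_alt case
instance (case : String) (out : String) : Decidable (Spec_process case out) := by unfold Spec_process; infer_instance

def pvDiffWitness_process : String := ""
def pvDiffWitnessOut_process : String × String := ("1", "")

-- ===== CLAIM (what is proved, stated in full; the proofs are below) =====
def Claim_unchanged_process : Prop := ∀ (case : String), Dom_process case → Spec_process case (process case)
def Claim_changed_process : Prop := Dom_process (pvDiffWitness_process) ∧ D_process (pvDiffWitness_process) ∧ process (pvDiffWitness_process) = pvDiffWitnessOut_process.1 ∧ process_alt (pvDiffWitness_process) = pvDiffWitnessOut_process.2 ∧ pvDiffWitnessOut_process.1 ≠ pvDiffWitnessOut_process.2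
def Claim_exact_process : Prop := ∀ (case : String), Dom_process case → D_process case → process case ≠ process_alt case

-- ===== LEMMAS AND PROOFS =====

-- reference scan: itertools-style accumulate of the pairwise booleans
def accumScan (a : Int) : List Bool → List Int
  | [] => [a]
  | b :: bs => a :: accumScan (if b then a + 1 else 1) bs

def bools (l : List Char) : List Bool := (l.zip l.tail).map (fun p : Char × Char => decide (p.2 > p.1))

def takeTrue : List Bool → Nat
  | [] => 0
  | b :: bs => if b then takeTrue bs + 1 else 0

theorem takeTrue_le (u : List Bool) : takeTrue u ≤ u.length := by
  induction u with
  | nil => exact Nat.le_refl 0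
  | cons b bs ih =>
      cases b
      · simp [takeTrue]
      · simp [takeTrue]; omega

def ramp (a : Int) : Nat → List Int
  | 0 => [a]
  | t + 1 => a :: ramp (a + 1) t

-- segment view of the run-length list
def segs (u : List Bool) : List Int :=
  PySem.List.pyRange 1 (takeTrue u + 2) 1 ++
    (if h : takeTrue u = u.length then [] else segs (u.drop (takeTrue u + 1)))
termination_by u.length
decreasing_by
  have := takeTrue_le u
  simp [List.length_drop]; omega

-- A's foldl over pairs, seeded [1], is the accumulate scan
theorem foldl_eq_accumScan (ps : List (Char × Char)) (pre : List Int) (a : Int) :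
    ps.foldl
      (fun lens (p : Char × Char) =>
        if p.2 > p.1 then
          lens ++ [((PySem.List.pyGet? lens (-1)).getD 0) + 1]
        else
          lens ++ [(1 : Int)]) (pre ++ [a])
      = pre ++ accumScan a (ps.map (fun p : Char × Char => decide (p.2 > p.1))) := by
  induction ps generalizing pre a with
  | nil => simp [accumScan]
  | cons p ps ih =>
    simp only [List.foldl_cons, List.map_cons, accumScan]
    by_cases h : p.2 > p.1
    · rw [if_pos h, PySem.List.pyGet?_neg_one_append_singleton]
      have := ih (pre ++ [a]) (a + 1)
      simpa [h] using this
    · rw [if_neg h]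
      have := ih (pre ++ [a]) 1
      simpa [h] using this

theorem length_bools (l : List Char) : (bools l).length = l.length - 1 := by
  simp [bools]

theorem getElem_bools (l : List Char) (k : Nat) (hk : k + 1 < l.length) :
    (bools l)[k]'(by simp [length_bools]; omega) = decide (l[k+1] > l[k]'(by omega)) := by
  simp [bools]

theorem accum_split (u : List Bool) (a : Int) :
    accumScan a u = ramp a (takeTrue u) ++
      (if takeTrue u = u.length then [] else accumScan 1 (u.drop (takeTrue u + 1))) := by
  induction u generalizing a with
  | nil => simp [accumScan, takeTrue, ramp]
  | cons b bs ih =>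
    cases b with
    | true =>
      by_cases hE : takeTrue bs = bs.length
      · have hE' : takeTrue bs + 1 = bs.length + 1 := by omega
        simp [accumScan, takeTrue, ramp, hE, ih (a + 1)]
      · have hE' : ¬ (takeTrue bs + 1 = bs.length + 1) := by omega
        simp [accumScan, takeTrue, ramp, hE, ih (a + 1)]
    | false =>
      simp [accumScan, takeTrue, ramp]

theorem ramp_eq_pyRange (t : Nat) (a : Int) : ramp a t = PySem.List.pyRange a (a + t + 1) 1 := by
  induction t generalizing a with
  | zero =>
    rw [PySem.List.pyRange_one_cons (by omega), PySem.List.pyRange_one_eq_nil (by omega)]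
    simp [ramp]
  | succ t ih =>
    rw [PySem.List.pyRange_one_cons (by omega)]
    simp only [ramp, ih (a + 1)]
    congr 2
    omega

theorem accum_eq_segs (u : List Bool) : accumScan 1 u = segs u := by
  rw [accum_split, segs]
  have hr : ramp 1 (takeTrue u) = PySem.List.pyRange 1 (↑(takeTrue u) + 2) 1 := by
    rw [ramp_eq_pyRange]; congr 1; omega
  rw [hr]
  by_cases h : takeTrue u = u.length
  · simp [h]
  · rw [if_neg h, dif_neg h, accum_eq_segs (u.drop (takeTrue u + 1))]
termination_by u.length
decreasing_by
  have := takeTrue_le u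
  simp [List.length_drop]; omega

theorem inner_eq (l : List Char) (fuel : Nat) (j : Int) (h1 : 1 ≤ j) (h2 : j ≤ l.length)
    (hf : ((l.length : Int) - j).toNat ≤ fuel) :
    innerJ l (l.length) fuel j = j + takeTrue ((bools l).drop (j - 1).toNat) := by
  induction fuel generalizing j with
  | zero =>
    have hje : j = (l.length : Int) := by omega
    have hnil : (bools l).drop (j - 1).toNat = [] := by
      apply List.drop_eq_nil_of_le
      rw [length_bools]; omega
    rw [innerJ, hnil]
    simp [takeTrue]
  | succ fuel ih =>
    rw [innerJ]
    by_cases hj : j < (l.length : Int)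
    · have hjn : j.toNat < l.length := by omega
      have hidx : (j - 1).toNat + 1 = j.toNat := by omega
      have hget : PySem.List.pyGet? l j = some (l[j.toNat]'hjn) := by
        apply PySem.List.pyGet?_eq_some_getElem <;> omega
      have hget' : PySem.List.pyGet? l (j - 1) = some (l[(j-1).toNat]'(by omega)) := by
        apply PySem.List.pyGet?_eq_some_getElem <;> omega
      have hdroplen : (j - 1).toNat < (bools l).length := by
        rw [length_bools]; omega
      have hdrop : (bools l).drop (j - 1).toNat =
          (bools l)[(j-1).toNat]'hdroplen :: (bools l).drop j.toNat := by
        rw [List.drop_eq_getElem_cons hdroplen, hidx]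
      have hb : (bools l)[(j-1).toNat]'hdroplen
          = decide (l[j.toNat]'hjn > l[(j-1).toNat]'(by omega)) := by
        have h3 := getElem_bools l (j - 1).toNat (by omega)
        simp only [hidx] at h3
        exact h3
      by_cases hc : (PySem.List.pyGet? l j).getD ' ' > (PySem.List.pyGet? l (j - 1)).getD ' '
      · have hcc : l[j.toNat]'hjn > l[(j-1).toNat]'(by omega) := by
          rw [hget, hget'] at hc
          exact hc
        rw [if_pos ⟨hj, hc⟩]
        rw [ih (j + 1) (by omega) (by omega) (by omega)]
        have hidx2 : ((j + 1) - 1).toNat = j.toNat := by omega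
        rw [hidx2, hdrop, hb]
        simp only [takeTrue, decide_eq_true hcc, if_true]
        push_cast; omega
      · rw [if_neg (by rintro ⟨-, hcmp⟩; exact hc hcmp)]
        have hcc : ¬ (l[j.toNat]'hjn > l[(j-1).toNat]'(by omega)) := by
          intro hx
          apply hc
          rw [hget, hget']
          exact hx
        rw [hdrop, hb]
        simp only [takeTrue, decide_eq_false hcc]
        simp
    · rw [if_neg (by rintro ⟨hlt, -⟩; omega)]
      have hnil : (bools l).drop (j - 1).toNat = [] := by
        apply List.drop_eq_nil_of_le
        rw [length_bools]; omega
      rw [hnil]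
      simp [takeTrue]

theorem outer_eq (l : List Char) (fuel : Nat) (i : Int) (parts : List Int)
    (h1 : 0 ≤ i) (h2 : i ≤ l.length) (hf : ((l.length : Int) - i).toNat ≤ fuel) :
    outer l (l.length) fuel parts i =
      parts ++ (if i < (l.length : Int) then segs ((bools l).drop i.toNat) else []) := by
  induction fuel generalizing i parts with
  | zero =>
    have : ¬ (i < (l.length : Int)) := by omega
    rw [outer, if_neg this, List.append_nil]
  | succ fuel ih =>
    rw [outer]
    by_cases hi : i < (l.length : Int)
    · rw [if_pos hi, if_pos hi]
      have hidx : ((i + 1) - 1).toNat = i.toNat := by omega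
      have hIn : innerJ l (l.length) ((l.length : Int) - (i + 1)).toNat (i + 1)
          = (i + 1) + takeTrue ((bools l).drop i.toNat) := by
        rw [inner_eq l _ (i + 1) (by omega) (by omega) (by omega), hidx]
      set u := (bools l).drop i.toNat with hu
      have hulen : u.length = l.length - 1 - i.toNat := by
        rw [hu, List.length_drop, length_bools]
      have htle : takeTrue u ≤ u.length := takeTrue_le u
      rw [hIn]
      rw [ih ((i + 1) + (takeTrue u : Int)) _ (by omega) (by omega) (by omega)]
      have hrange : PySem.List.pyRange 1 ((i + 1) + (takeTrue u : Int) - i + 1) 1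
          = PySem.List.pyRange 1 ((takeTrue u : Int) + 2) 1 := by
        congr 1; omega
      rw [hrange]
      by_cases hend : takeTrue u = u.length
      · have hnlt : ¬ ((i + 1) + (takeTrue u : Int) < (l.length : Int)) := by omega
        rw [if_neg hnlt]
        conv_rhs => rw [segs]
        rw [dif_pos hend]
        simp
      · have hlt : (i + 1) + (takeTrue u : Int) < (l.length : Int) := by omega
        rw [if_pos hlt]
        have hdd : (bools l).drop ((i + 1) + (takeTrue u : Int)).toNat = u.drop (takeTrue u + 1) := by
          rw [hu, List.drop_drop]
          congr 1
          omega
        rw [hdd]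
        conv_rhs => rw [segs]
        rw [dif_neg hend]
        simp
    · rw [if_neg hi, if_neg hi, List.append_nil]

theorem processAlt_empty : process_alt "" = "" := by
  decide

-- ===== VERDICT =====
theorem process_spec : Claim_unchanged_process := by
  intro case _ hD
  have hne : case ≠ "" := fun h => hD (by unfold D_process; exact h)
  have hl : case.toList ≠ [] := by
    intro h
    exact hne (String.toList_eq_nil_iff.mp h)
  have hA := foldl_eq_accumScan (case.toList.zip case.toList.tail) [] 1
  simp only [List.nil_append] at hA
  have hpos : 0 < case.toList.length := List.length_pos_iff.mpr hl
  have hB := outer_eq case.toList (case.toList.length : Int).toNat 0 [] le_rfl (by omega) (by omega)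
  rw [if_pos (by exact_mod_cast hpos)] at hB
  simp only [Int.toNat_zero, List.drop_zero, List.nil_append] at hB
  show PySem.Str.join " " (_) = PySem.Str.join " " (_)
  rw [hA, hB, accum_eq_segs]
  rfl

theorem process_changed : Claim_changed_process := by
  unfold Claim_changed_process
  refine ⟨by decide, by decide, by decide, ?_, by decide⟩
  show process_alt "" = ""
  exact processAlt_empty

theorem process_tight : Claim_exact_process := by
  intro case _ hD
  unfold D_process at hD
  subst hD
  rw [processAlt_empty]
  decide
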